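-- pv_equiv track=rewrite | github.com/anonymizer2/DENIM_2024 | models/utils.py | mapping_index_to_ARs_token
-- ===== SOURCE A (Python) =====
-- def mapping_index_to_ARs_token(index, dataset):
--     # 0 对应 (0, 1)
--     index += 1
--     pair_0 = 0
--     pair_1 = 1
--
--     if dataset == "AAEC":
--         row_num = 11
--         while index - row_num > 0:
--             index -= row_num
--             pair_0 += 1
--             pair_1 += 1
--             row_num -= 1
--         pair_1 += (index - 1)
--     elif dataset == "AbstRCT":
--         row_num = 10
--         while index - row_num > 0:
--             index -= row_num
--             pair_0 += 1
--             pair_1 += 1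
--             row_num -= 1
--         pair_1 += (index - 1)
--     else:
--         raise ValueError
--
--     return (pair_0, pair_1)
-- ===== SOURCE B (Python) =====
-- def _isqrt(x):
--     # recursive integer square root (x >= 0)
--     if x < 2:
--         return x
--     r = 2 * _isqrt(x // 4)
--     if (r + 1) * (r + 1) <= x:
--         return r + 1
--     return r
--
--
-- def mapping_index_to_ARs_token(index, dataset):
--     if dataset == "AAEC":
--         R = 11
--     elif dataset == "AbstRCT":
--         R = 10
--     else:
--         raise ValueError
--     n = index + 1
--     if n <= R:
--         # first row holds positions 1..R (and everything below)
--         return (0, n)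
--     # row k is the largest k with S(k) = k*R - k*(k-1)//2 < n;
--     # equivalently the smallest j = R - k with j*(j+1)//2 >= T - n + 1
--     T = R * (R + 1) // 2
--     m = T - n
--     j = (_isqrt(8 * m + 9) - 1) // 2
--     if j * (j + 1) // 2 < m + 1:
--         j += 1
--     k = R - j
--     s = k * R - k * (k - 1) // 2
--     return (k, k + n - s)
-- ===== Notes on version B (the rewrite author's own statement) =====
-- stated objective: alternative
-- what changed: Replaces A's row-by-row subtraction while-loop with a closed-form inversion of the triangular cumulative sums using a recursive integer square root plus a one-step correction.
import Mathlib
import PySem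

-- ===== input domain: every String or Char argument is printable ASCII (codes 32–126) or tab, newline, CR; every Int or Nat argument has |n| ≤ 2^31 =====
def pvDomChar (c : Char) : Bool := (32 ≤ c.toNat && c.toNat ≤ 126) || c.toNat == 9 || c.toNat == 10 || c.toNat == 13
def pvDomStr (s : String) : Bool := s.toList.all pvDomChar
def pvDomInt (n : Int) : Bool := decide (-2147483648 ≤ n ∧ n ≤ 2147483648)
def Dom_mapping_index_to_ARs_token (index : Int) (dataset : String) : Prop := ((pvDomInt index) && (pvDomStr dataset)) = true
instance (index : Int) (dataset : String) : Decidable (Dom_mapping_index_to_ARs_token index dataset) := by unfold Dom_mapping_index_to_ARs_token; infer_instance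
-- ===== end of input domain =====

-- B replaces A's row-by-row subtraction loop by a closed-form triangular-index inversion
-- (integer square root + correction); return-value equivalence on Pre_ (where A terminates).


-- ===== PORT A =====
-- the while loop of A; fuel makes the port total (within Pre_ the loop runs at most rowNum steps,
-- so fuel 12/11 is never exhausted there); state is (index, pair_0, pair_1, row_num)
def pvLoopA (fuel : Nat) (index pair0 pair1 rowNum : Int) : Int × Int × Int :=
  match fuel with
  | 0 => (index, pair0, pair1)
  | f + 1 =>
    if index - rowNum > 0 then
      pvLoopA f (index - rowNum) (pair0 + 1) (pair1 + 1) (rowNum - 1)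
    else (index, pair0, pair1)

def mapping_index_to_ARs_token (index : Int) (dataset : String) : Int × Int :=
  let index := index + 1
  if dataset = "AAEC" then
    let r := pvLoopA 12 index 0 1 11
    (r.2.1, r.2.2 + (r.1 - 1))
  else if dataset = "AbstRCT" then
    let r := pvLoopA 11 index 0 1 10
    (r.2.1, r.2.2 + (r.1 - 1))
  else (0, 0)  -- Python raises ValueError here; excluded by Pre_

-- ===== PORT B =====
-- Source B's recursive _isqrt; the Nat fuel (x.toNat is ample: the recursion descends on x // 4)
-- only makes the recursion structural
def pvIsqrtAux (fuel : Nat) (x : Int) : Int :=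
  match fuel with
  | 0 => x
  | f + 1 =>
    if x < 2 then x
    else
      let r := 2 * pvIsqrtAux f (PySem.Int.floordiv x 4)
      if (r + 1) * (r + 1) ≤ x then r + 1 else r

def pvIsqrt (x : Int) : Int := pvIsqrtAux x.toNat x

-- shared body of Source B after R is chosen
def pvAltCore (index R : Int) : Int × Int :=
  let n := index + 1
  if n ≤ R then (0, n)
  else
    let T := PySem.Int.floordiv (R * (R + 1)) 2
    let m := T - n
    let j0 := PySem.Int.floordiv (pvIsqrt (8 * m + 9) - 1) 2
    let j := if PySem.Int.floordiv (j0 * (j0 + 1)) 2 < m + 1 then j0 + 1 else j0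
    let k := R - j
    let s := k * R - PySem.Int.floordiv (k * (k - 1)) 2
    (k, k + n - s)

def mapping_index_to_ARs_token_alt (index : Int) (dataset : String) : Int × Int :=
  if dataset = "AAEC" then pvAltCore index 11
  else if dataset = "AbstRCT" then pvAltCore index 10
  else (0, 0)  -- Source B raises ValueError here; excluded by Pre_

-- ===== PRECONDITION & SPEC =====
-- Pre_ excludes exactly the inputs where A returns no value: unknown datasets (ValueError) and
-- indices beyond the triangle (index+1 > 66 resp. 55), where A's while loop never terminates.
def Pre_mapping_index_to_ARs_token (index : Int) (dataset : String) : Prop :=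
  (dataset = "AAEC" ∧ index + 1 ≤ 66) ∨ (dataset = "AbstRCT" ∧ index + 1 ≤ 55)
instance (index : Int) (dataset : String) : Decidable (Pre_mapping_index_to_ARs_token index dataset) := by unfold Pre_mapping_index_to_ARs_token; infer_instance

def pvWitness_mapping_index_to_ARs_token : Int × String := (17, "AAEC")

def Spec_mapping_index_to_ARs_token (index : Int) (dataset : String) (out : Int × Int) : Prop := out = mapping_index_to_ARs_token_alt index dataset
instance (index : Int) (dataset : String) (out : Int × Int) : Decidable (Spec_mapping_index_to_ARs_token index dataset out) := by unfold Spec_mapping_index_to_ARs_token; infer_instance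

-- ===== CLAIM (what is proved, stated in full; the proofs are below) =====
def Claim_equal_mapping_index_to_ARs_token : Prop := ∀ (index : Int) (dataset : String), Dom_mapping_index_to_ARs_token index dataset → Pre_mapping_index_to_ARs_token index dataset → Spec_mapping_index_to_ARs_token index dataset (mapping_index_to_ARs_token index dataset)

-- ===== LEMMAS AND PROOFS =====

-- first-row case: when index+1 ≤ R both sides return (0, index+1)
lemma pv_first_row (index R : Int) (h : index + 1 ≤ R) :
    pvAltCore index R = (0, index + 1) := by
  simp [pvAltCore, h]

lemma pv_loop_stop (f : Nat) (index p0 p1 rowNum : Int) (h : ¬ index - rowNum > 0) :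
    pvLoopA (f + 1) index p0 p1 rowNum = (index, p0, p1) := by
  unfold pvLoopA; rw [if_neg h]

lemma pv_case_AAEC (index : Int) (h : index + 1 ≤ 66) :
    mapping_index_to_ARs_token index "AAEC" = mapping_index_to_ARs_token_alt index "AAEC" := by
  by_cases hs : index + 1 ≤ 11
  · have hstop : ¬ index + 1 - 11 > 0 := by omega
    simp [mapping_index_to_ARs_token, mapping_index_to_ARs_token_alt,
      pv_loop_stop 11 (index + 1) 0 1 11 hstop, pv_first_row index 11 hs]
    omega
  · -- 11 < index+1 ≤ 66 : finitely many indices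
    have h1 : 11 ≤ index := by omega
    have h2 : index ≤ 65 := by omega
    interval_cases index <;> decide

lemma pv_case_AbstRCT (index : Int) (h : index + 1 ≤ 55) :
    mapping_index_to_ARs_token index "AbstRCT" = mapping_index_to_ARs_token_alt index "AbstRCT" := by
  by_cases hs : index + 1 ≤ 10
  · have hstop : ¬ index + 1 - 10 > 0 := by omega
    simp [mapping_index_to_ARs_token, mapping_index_to_ARs_token_alt,
      pv_loop_stop 10 (index + 1) 0 1 10 hstop, pv_first_row index 10 hs]
    omega
  · have h1 : 10 ≤ index := by omega
    have h2 : index ≤ 54 := by omega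
    interval_cases index <;> decide

-- ===== VERDICT (by name: the statement is the Claim_ definition above) =====
theorem mapping_index_to_ARs_token_spec : Claim_equal_mapping_index_to_ARs_token := by
  intro index dataset _ hpre
  unfold Spec_mapping_index_to_ARs_token
  rcases hpre with ⟨hd, hle⟩ | ⟨hd, hle⟩ <;> subst hd
  · exact pv_case_AAEC index hle
  · exact pv_case_AbstRCT index hle
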